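-- pv_equiv track=rewrite | github.com/JorgeOrtizV/HackerRank | Problem Solving/ACM_ICPC_Team.py | team_aranger
-- ===== SOURCE A (Python) =====
-- from itertools import combinations
--
-- def team_aranger(atendees, atendees_expertise):
--     atendees_list = combinations(range(1, atendees+1),2)
--     possible_teams = list(atendees_list)
--     max = 0
--     counter = 0
--     for i in possible_teams:
--         expertise1 = atendees_expertise[i[0]-1]
--         expertise2 = atendees_expertise[i[1]-1]
--         combined_expertise = str(bin((expertise1 | expertise2)))
--         combined_expertise = sum(list(map(int, list(combined_expertise[2:]))))
--         if combined_expertise > max: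
--             max = combined_expertise
--             counter = 1
--         elif combined_expertise == max:
--             counter += 1
--         else:
--             pass
--     return max, counter
-- ===== SOURCE B (Python) =====
-- def team_aranger(atendees, atendees_expertise):
--     def popcount(x):
--         return 0 if x <= 0 else x % 2 + popcount(x // 2)
--     hist = {}
--     for i in range(atendees):
--         for j in range(i + 1, atendees):
--             p = popcount(atendees_expertise[i] | atendees_expertise[j])
--             hist[p] = hist.get(p, 0) + 1
--     if not hist:
--         return 0, 0
--     m = max(hist)
--     return m, hist[m]
-- ===== Notes on version B (the rewrite author's own statement) =====
-- stated objective: alternative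
-- what changed: A streams combinations with a running max/tie-counter state machine and computes each popcount by summing the characters of bin(x)[2:]; B instead builds a popcount->pair-count histogram dict over nested index loops (no running max or branch logic), computes popcounts by arithmetic recursion (x%2 + popcount(x//2)) with no string formatting, and reads the answer off the histogram as (max key, its stored count).
import Mathlib
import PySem

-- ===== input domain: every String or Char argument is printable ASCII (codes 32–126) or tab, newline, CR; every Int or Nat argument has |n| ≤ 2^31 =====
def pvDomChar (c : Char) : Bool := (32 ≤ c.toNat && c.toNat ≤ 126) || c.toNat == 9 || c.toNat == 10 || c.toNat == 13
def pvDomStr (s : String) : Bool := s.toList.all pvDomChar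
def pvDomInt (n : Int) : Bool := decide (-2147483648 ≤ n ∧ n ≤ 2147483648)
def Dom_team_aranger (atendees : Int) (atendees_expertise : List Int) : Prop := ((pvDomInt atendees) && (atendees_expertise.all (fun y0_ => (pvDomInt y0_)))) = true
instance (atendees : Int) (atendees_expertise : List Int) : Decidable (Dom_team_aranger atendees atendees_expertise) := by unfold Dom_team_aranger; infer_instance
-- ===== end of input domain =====

-- B replaces A's combinations stream with its running max/tie-counter state machine and
-- string-based binary digit summing by nested index loops that build a popcount→pair-count
-- histogram dict (popcount by arithmetic recursion x%2 + pc(x//2)), then reads the answer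
-- off the histogram as (max key, stored count) — objective: alternative.

-- ===== PORT A =====
-- itertools.combinations(l, 2) in iteration order: each element paired with every later element
def pvCombos2 : List Int → List (Int × Int)
  | [] => []
  | x :: rest => rest.map (fun y => (x, y)) ++ pvCombos2 rest

def team_aranger (atendees : Int) (atendees_expertise : List Int) : Int × Int :=
  let possible_teams := pvCombos2 (PySem.List.pyRange 1 (atendees + 1) 1)
  possible_teams.foldl (fun st i =>
    let expertise1 := (PySem.List.pyGet? atendees_expertise (i.1 - 1)).getD 0
    let expertise2 := (PySem.List.pyGet? atendees_expertise (i.2 - 1)).getD 0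
    -- str(bin(e1 | e2)), then [2:], then sum(map(int, …)); int(c) = PySem.Int.ofChars? [c]
    let ce := ((PySem.List.slice (PySem.Int.toBinChars0b (PySem.Int.bor expertise1 expertise2))
        (some 2) none).map (fun c => (PySem.Int.ofChars? [c]).getD 0)).sum
    if ce > st.1 then (ce, 1)
    else if ce = st.1 then (st.1, st.2 + 1)
    else st) (0, 0)

-- ===== PORT B =====
-- B's recursive popcount: 0 if x <= 0 else x % 2 + popcount(x // 2)
def pvPopcount (x : Int) : Int :=
  if x ≤ 0 then 0
  else PySem.Int.mod x 2 + pvPopcount (PySem.Int.floordiv x 2)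
termination_by x.toNat
decreasing_by
  rw [PySem.Int.floordiv_eq_ediv_of_pos (by omega : (0:Int) < 2)]
  omega

def team_aranger_alt (atendees : Int) (atendees_expertise : List Int) : Int × Int :=
  -- for i in range(atendees): for j in range(i+1, atendees): hist[p] = hist.get(p, 0) + 1
  -- (indices are always in range under Pre_, so xs[i] is ported with the total pyGetD)
  let hist := (PySem.List.pyRange 0 atendees 1).foldl (fun d i =>
      (PySem.List.pyRange (i + 1) atendees 1).foldl (fun d j =>
        let p := pvPopcount (PySem.Int.bor (PySem.List.pyGetD atendees_expertise i 0)
                                           (PySem.List.pyGetD atendees_expertise j 0))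
        d.insert p (d.getD p 0 + 1)) d) PySem.Dict.empty
  if hist.size = 0 then (0, 0)
  else
    let m := (PySem.List.max? hist.keys (fun y => y)).getD 0  -- max(hist); some, as hist ≠ {}
    (m, hist.getD m 0)

-- ===== PRECONDITION & SPEC =====
-- When there is at least one pair (atendees ≥ 2), A raises IndexError unless the list has at
-- least `atendees` entries, and raises ValueError (int('b') / int('-') on the '-0b…' string)
-- if any accessed expertise value is negative; Pre_ excludes exactly those inputs.
def Pre_team_aranger (atendees : Int) (atendees_expertise : List Int) : Prop :=
  2 ≤ atendees → (atendees ≤ atendees_expertise.length ∧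
    ∀ k < atendees.toNat, 0 ≤ atendees_expertise.getD k 0)
instance (atendees : Int) (atendees_expertise : List Int) : Decidable (Pre_team_aranger atendees atendees_expertise) := by unfold Pre_team_aranger; infer_instance
def pvWitness_team_aranger : Int × List Int := (3, [1, 2, 4])

def Spec_team_aranger (atendees : Int) (atendees_expertise : List Int) (out : Int × Int) : Prop := out = team_aranger_alt atendees atendees_expertise
instance (atendees : Int) (atendees_expertise : List Int) (out : Int × Int) : Decidable (Spec_team_aranger atendees atendees_expertise out) := by unfold Spec_team_aranger; infer_instance

-- ===== CLAIM (what is proved, stated in full; the proofs are below) =====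
def Claim_equal_team_aranger : Prop := ∀ (atendees : Int) (atendees_expertise : List Int), Dom_team_aranger atendees atendees_expertise → Pre_team_aranger atendees atendees_expertise → Spec_team_aranger atendees atendees_expertise (team_aranger atendees atendees_expertise)

-- ===== LEMMAS AND PROOFS =====

-- A's per-pair value (digit-sum of bin(x)[2:]), as a function of the 1-based pair
def pvCeA (xs : List Int) (i : Int × Int) : Int :=
  ((PySem.List.slice (PySem.Int.toBinChars0b (PySem.Int.bor
      ((PySem.List.pyGet? xs (i.1 - 1)).getD 0) ((PySem.List.pyGet? xs (i.2 - 1)).getD 0)))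
    (some 2) none).map (fun c => (PySem.Int.ofChars? [c]).getD 0)).sum

-- B's per-pair value, as a function of the 0-based pair
def pvCeB (xs : List Int) (p : Int × Int) : Int :=
  pvPopcount (PySem.Int.bor (PySem.List.pyGetD xs p.1 0) (PySem.List.pyGetD xs p.2 0))

-- number of '1' binary digits of a natural number, by halving (the value pvPopcount computes)
def pcN (n : Nat) : Nat :=
  if n = 0 then 0 else n % 2 + pcN (n / 2)
decreasing_by omega

theorem pv_toDigitsCore_binary : ∀ (fuel n : Nat) (acc : List Char),
    (∀ c ∈ acc, c = '0' ∨ c = '1') → ∀ c ∈ Nat.toDigitsCore 2 fuel n acc, c = '0' ∨ c = '1' := by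
  intro fuel
  induction fuel with
  | zero => intro n acc hacc c hc; exact hacc c hc
  | succ fuel ih =>
    intro n acc hacc c hc
    have hd : ∀ c ∈ ((n % 2).digitChar :: acc), c = '0' ∨ c = '1' := by
      intro c hc
      rcases List.mem_cons.mp hc with h | h
      · rcases Nat.mod_two_eq_zero_or_one n with h2 | h2 <;>
          · rw [h, h2]; simp [Nat.digitChar]
      · exact hacc c h
    rw [Nat.toDigitsCore] at hc
    by_cases h0 : n / 2 = 0
    · rw [if_pos h0] at hc; exact hd c hc
    · rw [if_neg h0] at hc; exact ih (n / 2) _ hd c hc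

theorem pv_digitSum_eq_count : ∀ (l : List Char), (∀ c ∈ l, c = '0' ∨ c = '1') →
    (l.map (fun c => (PySem.Int.ofChars? [c]).getD 0)).sum = ((List.count '1' l : Nat) : Int) := by
  intro l
  induction l with
  | nil => intro _; simp
  | cons a t ih =>
    intro h
    have ht := ih (fun c hc => h c (List.mem_cons_of_mem a hc))
    have h0 : PySem.Int.ofChars? ['0'] = some 0 := by decide
    have h1 : PySem.Int.ofChars? ['1'] = some 1 := by decide
    rcases h a (List.mem_cons_self) with ha | ha
    · subst ha; simp [ht, h0]
    · subst ha
      simp [ht, h1]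
      omega

theorem pv_pcN_def (n : Nat) (h : n ≠ 0) : pcN n = n % 2 + pcN (n / 2) := by
  rw [pcN, if_neg h]

-- counting '1' in the binary digit string is pcN
theorem pv_count_toDigitsCore : ∀ (fuel n : Nat) (acc : List Char), n < fuel →
    (Nat.toDigitsCore 2 fuel n acc).count '1' = pcN n + acc.count '1' := by
  intro fuel
  induction fuel with
  | zero => intro n acc h; omega
  | succ fuel ih =>
    intro n acc h
    rw [Nat.toDigitsCore]
    by_cases h0 : n / 2 = 0
    · rw [if_pos h0]
      have hn1 : n ≤ 1 := by omega
      interval_cases n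
      · simp [pcN, Nat.digitChar]
      · rw [pv_pcN_def 1 (by omega)]
        simp [pcN, Nat.digitChar]
        omega
    · rw [if_neg h0, ih (n / 2) _ (by omega), pv_pcN_def n (by omega)]
      rcases Nat.mod_two_eq_zero_or_one n with h2 | h2 <;>
        simp [h2, Nat.digitChar] <;> omega

theorem pvPopcount_natCast : ∀ n : Nat, pvPopcount (n : Int) = (pcN n : Int) := by
  intro n
  induction n using Nat.strong_induction_on with
  | _ n ih =>
    rw [pvPopcount]
    by_cases h0 : n = 0
    · subst h0; simp [pcN]
    · rw [if_neg (by omega : ¬ ((n : Int) ≤ 0))]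
      have h2 : ((2 : Nat) : Int) = (2 : Int) := rfl
      rw [← h2, PySem.Int.mod_natCast, PySem.Int.floordiv_natCast,
        ih (n / 2) (by omega), pv_pcN_def n h0]
      push_cast
      ring

theorem pvPopcount_nonneg (x : Int) : 0 ≤ pvPopcount x := by
  by_cases h : x ≤ 0
  · rw [pvPopcount, if_pos h]
  · have : x = ((x.toNat : Nat) : Int) := by omega
    rw [this, pvPopcount_natCast]
    exact Int.natCast_nonneg _

-- A's per-pair digit-sum equals B's recursive popcount, for a nonnegative combined value
theorem pv_ce_eq (y : Int) (h : 0 ≤ y) :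
    ((PySem.List.slice (PySem.Int.toBinChars0b y) (some 2) none).map
      (fun c => (PySem.Int.ofChars? [c]).getD 0)).sum = pvPopcount y := by
  have hbin : PySem.Int.toBinChars0b y = '0' :: 'b' :: Nat.toDigits 2 y.toNat := by
    rw [PySem.Int.toBinChars0b, if_neg (by omega)]
  have hdig : ∀ c ∈ Nat.toDigits 2 y.toNat, c = '0' ∨ c = '1' :=
    pv_toDigitsCore_binary _ _ [] (by intro c hc; cases hc)
  rw [hbin]
  have hslice : PySem.List.slice ('0' :: 'b' :: Nat.toDigits 2 y.toNat) (some 2) none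
      = Nat.toDigits 2 y.toNat := by
    have h2 : (2 : Int) = ((2 : Nat) : Int) := rfl
    rw [h2, PySem.List.slice_from_natCast]
    rfl
  rw [hslice, pv_digitSum_eq_count _ hdig, Nat.toDigits,
    pv_count_toDigitsCore _ _ _ (by omega)]
  conv_rhs => rw [show y = ((y.toNat : Nat) : Int) by omega, pvPopcount_natCast]
  simp

-- the running (max, tie-counter) fold of A, characterised: max of the mapped values and its count
theorem pv_fold_mc {α : Type} (f : α → Int) (l : List α) : ∀ (m c : Int),
    l.foldl (fun st x => if f x > st.1 then (f x, 1) else if f x = st.1 then (st.1, st.2 + 1) else st) (m, c)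
    = ((l.map f).foldl max m,
       (if (l.map f).foldl max m = m then c else 0) + (((l.map f).count ((l.map f).foldl max m) : Nat) : Int)) := by
  induction l with
  | nil => intro m c; simp
  | cons a t ih =>
    intro m c
    simp only [List.foldl_cons, List.map_cons]
    have hub := PySem.List.le_foldl_max (t.map f) (max m (f a))
    by_cases h1 : f a > m
    · have hmx : max m (f a) = f a := max_eq_right (le_of_lt h1)
      rw [if_pos h1, ih]
      simp only [hmx] at hub ⊢
      have hne : (t.map f).foldl max (f a) ≠ m := by
        have := hub.1; omega
      simp only [List.count_cons, beq_iff_eq, if_neg hne]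
      by_cases hM : f a = (t.map f).foldl max (f a)
      · rw [if_pos hM.symm, if_pos hM]; exact Prod.ext rfl (by push_cast; omega)
      · rw [if_neg (fun h => hM h.symm), if_neg hM]; exact Prod.ext rfl (by push_cast; omega)
    · have hmx : max m (f a) = m := max_eq_left (by omega)
      rw [if_neg h1]
      by_cases h2 : f a = m
      · rw [if_pos h2, ih]
        simp only [hmx] at hub ⊢
        simp only [List.count_cons, beq_iff_eq, h2]
        by_cases hM : (t.map f).foldl max m = m
        · rw [if_pos hM, if_pos hM, if_pos hM.symm]; exact Prod.ext rfl (by push_cast; omega)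
        · rw [if_neg hM, if_neg hM, if_neg (fun h => hM h.symm)]; exact Prod.ext rfl (by push_cast; omega)
      · rw [if_neg h2, ih]
        simp only [hmx] at hub ⊢
        have hne : f a ≠ (t.map f).foldl max m := by
          have := hub.1; omega
        simp only [List.count_cons, beq_iff_eq, if_neg hne]
        exact Prod.ext rfl (by push_cast; omega)

theorem pv_mem_combos2 {l : List Int} {i : Int × Int} (h : i ∈ pvCombos2 l) :
    i.1 ∈ l ∧ i.2 ∈ l := by
  induction l with
  | nil => cases h
  | cons x rest ih =>
    rw [pvCombos2, List.mem_append] at h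
    rcases h with h | h
    · rcases List.mem_map.mp h with ⟨y, hy, rfl⟩
      exact ⟨List.mem_cons_self, List.mem_cons_of_mem x hy⟩
    · exact ⟨List.mem_cons_of_mem x (ih h).1, List.mem_cons_of_mem x (ih h).2⟩

theorem pv_combos2_short (l : List Int) (h : l.length ≤ 1) : pvCombos2 l = [] := by
  match l, h with
  | [], _ => rfl
  | [x], _ => rfl

-- combinations over a mapped list
theorem pvCombos2_map (f : Int → Int) : ∀ (l : List Int),
    pvCombos2 (l.map f) = (pvCombos2 l).map (fun p => (f p.1, f p.2)) := by
  intro l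
  induction l with
  | nil => rfl
  | cons x t ih =>
    simp only [List.map_cons, pvCombos2, ih, List.map_append, List.map_map]
    rfl

-- range(a+1, b+1) is range(a, b) shifted by one
theorem pv_pyRange_shift : ∀ (a b : Int),
    PySem.List.pyRange (a + 1) (b + 1) 1 = (PySem.List.pyRange a b 1).map (· + 1) := by
  intro a b
  by_cases hab : a < b
  · have hm : (b - a).toNat ≠ 0 := by omega
    induction hn : (b - a).toNat generalizing a with
    | zero => omega
    | succ k ih =>
      rw [PySem.List.pyRange_one_cons (by omega : a + 1 < b + 1),
          PySem.List.pyRange_one_cons hab, List.map_cons]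
      by_cases hab' : a + 1 < b
      · rw [ih (a + 1) hab' (by omega) (by omega)]
      · have h1 : PySem.List.pyRange (a + 1) b 1 = [] :=
          List.eq_nil_of_length_eq_zero (by rw [PySem.List.length_pyRange_one]; omega)
        have h2 : PySem.List.pyRange (a + 1 + 1) (b + 1) 1 = [] :=
          List.eq_nil_of_length_eq_zero (by rw [PySem.List.length_pyRange_one]; omega)
        rw [h1, h2]
        rfl
  · have h1 : PySem.List.pyRange (a + 1) (b + 1) 1 = [] :=
      List.eq_nil_of_length_eq_zero (by rw [PySem.List.length_pyRange_one]; omega)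
    have h2 : PySem.List.pyRange a b 1 = [] :=
      List.eq_nil_of_length_eq_zero (by rw [PySem.List.length_pyRange_one]; omega)
    rw [h1, h2]
    rfl

-- the nested index loops visit exactly the combinations pairs, in order
theorem pv_nested_fold {δ : Type} (g : δ → Int × Int → δ) : ∀ (a b : Int) (init : δ),
    (PySem.List.pyRange a b 1).foldl (fun d i =>
      (PySem.List.pyRange (i + 1) b 1).foldl (fun d j => g d (i, j)) d) init
    = (pvCombos2 (PySem.List.pyRange a b 1)).foldl g init := by
  intro a b
  by_cases hab : a < b
  · induction hn : (b - a).toNat generalizing a with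
    | zero => omega
    | succ k ih =>
      intro init
      rw [PySem.List.pyRange_one_cons hab, pvCombos2, List.foldl_cons, List.foldl_append,
        List.foldl_map]
      by_cases hab' : a + 1 < b
      · rw [ih (a + 1) hab' (by omega)]
      · have h1 : PySem.List.pyRange (a + 1) b 1 = [] :=
          List.eq_nil_of_length_eq_zero (by rw [PySem.List.length_pyRange_one]; omega)
        rw [h1]
        rfl
  · intro init
    have h2 : PySem.List.pyRange a b 1 = [] :=
      List.eq_nil_of_length_eq_zero (by rw [PySem.List.length_pyRange_one]; omega)
    rw [h2]
    rfl

-- under Pre_, every accessed expertise value is nonnegative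
theorem pv_access_nonneg (atendees : Int) (xs : List Int)
    (hlen : atendees ≤ xs.length) (hpos : ∀ k < atendees.toNat, 0 ≤ xs.getD k 0)
    {i : Int} (h1 : 0 ≤ i) (h2 : i < atendees) :
    0 ≤ (PySem.List.pyGet? xs i).getD 0 := by
  have hk : i.toNat < atendees.toNat := by omega
  have hkl : i.toNat < xs.length := by omega
  rw [PySem.List.pyGet?_of_nonneg xs h1, List.getElem?_eq_getElem hkl, Option.getD_some]
  have := hpos _ hk
  rwa [List.getD_eq_getElem xs 0 hkl] at this

theorem pv_pyGetD_eq_pyGet?_getD (xs : List Int) (i : Int) :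
    PySem.List.pyGetD xs i 0 = (PySem.List.pyGet? xs i).getD 0 := rfl

-- the maximum of a nonempty nonnegative list read off its dedup, Python max(dict) style
theorem pv_max_dedup (L : List Int) (hne : L ≠ []) (hnn : ∀ x ∈ L, 0 ≤ x) :
    (PySem.List.max? (PySem.Set.ofList L) (fun y => y)).getD 0 = L.foldl max 0 := by
  cases hM : PySem.List.max? (PySem.Set.ofList L) (fun y => y) with
  | none =>
    exfalso
    rw [PySem.List.max?_eq_none_iff] at hM
    cases L with
    | nil => exact hne rfl
    | cons x t =>
      have : x ∈ PySem.Set.ofList (x :: t) := (PySem.Set.mem_ofList _ _).mpr List.mem_cons_self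
      rw [hM] at this
      cases this
  | some m =>
    have hmL : m ∈ L := (PySem.Set.mem_ofList _ _).mp (PySem.List.max?_mem hM)
    have h1 : m ≤ L.foldl max 0 := (PySem.List.le_foldl_max L 0).2 m hmL
    have h2 : L.foldl max 0 ≤ m := by
      rcases PySem.List.foldl_max_mem L 0 with h | h
      · rw [h]; exact hnn m hmL
      · exact PySem.List.max?_isMax hM _ ((PySem.Set.mem_ofList _ _).mpr h)
    simp only [Option.getD_some]
    omega

-- dict size is the number of keys
theorem pv_size_eq_keys_length {κ ν : Type} (d : PySem.Dict κ ν) :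
    d.size = d.keys.length := by
  cases d
  simp [PySem.Dict.size, PySem.Dict.keys]

-- ===== VERDICT (by name: the statement is the Claim_ definition above) =====
theorem team_aranger_spec : Claim_equal_team_aranger := by
  intro a xs _ hpre
  unfold Spec_team_aranger
  -- A as a fold over its pair list
  have hA : team_aranger a xs
      = (pvCombos2 (PySem.List.pyRange 1 (a + 1) 1)).foldl
          (fun st i => if pvCeA xs i > st.1 then (pvCeA xs i, 1)
            else if pvCeA xs i = st.1 then (st.1, st.2 + 1) else st) (0, 0) := rfl
  -- shift A's 1-based pairs to the 0-based pairs B's loops visit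
  have hshift : PySem.List.pyRange 1 (a + 1) 1 = (PySem.List.pyRange 0 a 1).map (· + 1) := by
    have := pv_pyRange_shift 0 a
    simpa using this
  set pairs := pvCombos2 (PySem.List.pyRange 0 a 1) with hpairs
  set L := pairs.map (pvCeB xs) with hL
  -- the two per-pair value maps agree on every pair that actually occurs
  have hmap : (pvCombos2 (PySem.List.pyRange 1 (a + 1) 1)).map (pvCeA xs) = L := by
    rw [hshift, pvCombos2_map, List.map_map, hL]
    by_cases h2a : 2 ≤ a
    case neg =>
      have hnil : pvCombos2 (PySem.List.pyRange 0 a 1) = [] :=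
        pv_combos2_short _ (by rw [PySem.List.length_pyRange_one]; omega)
      rw [hpairs, hnil]
      rfl
    rcases hpre h2a with ⟨hlen, hpos⟩
    apply List.map_congr_left
    intro p hp
    rcases pv_mem_combos2 hp with ⟨hp1, hp2⟩
    rcases PySem.List.mem_pyRange_one.mp hp1 with ⟨ha1, hb1⟩
    rcases PySem.List.mem_pyRange_one.mp hp2 with ⟨ha2, hb2⟩
    have e1 := pv_access_nonneg a xs hlen hpos ha1 hb1
    have e2 := pv_access_nonneg a xs hlen hpos ha2 hb2
    have hy : 0 ≤ PySem.Int.bor ((PySem.List.pyGet? xs p.1).getD 0) ((PySem.List.pyGet? xs p.2).getD 0) := by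
      rw [PySem.Int.bor_of_nonneg e1 e2]
      exact Int.natCast_nonneg _
    show pvCeA xs (p.1 + 1, p.2 + 1) = pvCeB xs p
    unfold pvCeA pvCeB
    simp only [add_sub_cancel_right, pv_pyGetD_eq_pyGet?_getD]
    exact pv_ce_eq _ hy
  -- B's histogram is the counter of L
  have hhist : (PySem.List.pyRange 0 a 1).foldl (fun d i =>
      (PySem.List.pyRange (i + 1) a 1).foldl (fun d j =>
        let p := pvPopcount (PySem.Int.bor (PySem.List.pyGetD xs i 0)
                                           (PySem.List.pyGetD xs j 0))
        d.insert p (d.getD p 0 + 1)) d) PySem.Dict.empty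
      = PySem.Dict.counter L := by
    have hnest := pv_nested_fold (δ := PySem.Dict Int Int)
      (fun d q => d.insert (pvCeB xs q) (d.getD (pvCeB xs q) 0 + 1)) 0 a PySem.Dict.empty
    have hfm : L.foldl (fun d x => d.insert x (d.getD x 0 + 1))
          (PySem.Dict.empty : PySem.Dict Int Int)
        = (pvCombos2 (PySem.List.pyRange 0 a 1)).foldl
            (fun d q => d.insert (pvCeB xs q) (d.getD (pvCeB xs q) 0 + 1)) PySem.Dict.empty := by
      rw [hL]
      exact List.foldl_map ..
    exact (hnest.trans hfm.symm).trans (PySem.Dict.foldl_insert_getD_add_one_eq_counter L)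
  have hB : team_aranger_alt a xs
      = (if (PySem.Dict.counter L).size = 0 then ((0 : Int), (0 : Int))
        else ((PySem.List.max? (PySem.Dict.counter L).keys (fun y => y)).getD 0,
          (PySem.Dict.counter L).getD
            ((PySem.List.max? (PySem.Dict.counter L).keys (fun y => y)).getD 0) 0)) := by
    rw [team_aranger_alt]
    simp only [← hhist]
  have hnn : ∀ x ∈ L, 0 ≤ x := by
    intro x hx
    rcases List.mem_map.mp hx with ⟨p, _, rfl⟩
    exact pvPopcount_nonneg _
  rw [hA, pv_fold_mc (pvCeA xs) _ 0 0, hmap, hB]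
  by_cases hLe : L = []
  · rw [hLe]
    simp [PySem.Dict.counter]
  · obtain ⟨v, hv⟩ := List.exists_mem_of_ne_nil _ hLe
    have hsz : (PySem.Dict.counter L).size ≠ 0 := by
      rw [pv_size_eq_keys_length, PySem.Dict.keys_counter]
      intro h0
      have hv' : v ∈ PySem.Set.ofList L := (PySem.Set.mem_ofList _ _).mpr hv
      rw [List.length_eq_zero_iff.mp h0] at hv'
      cases hv'
    rw [if_neg hsz, PySem.Dict.keys_counter, pv_max_dedup L hLe hnn, PySem.Dict.getD_counter]
    simp
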